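-- pv_equiv track=rewrite | github.com/sarbeshtiwari/arc-agi-3 | environment_files/cm10/cm10.py | _polyline_cells
-- ===== SOURCE A (Python) =====
-- from typing import Any, Dict, List, Optional, Set, Tuple
--
-- GridPos = Tuple[int, int]
--
-- def _line_cells(start: GridPos, end: GridPos) -> List[GridPos]:
--     row1, col1 = start
--     row2, col2 = end
--     cells: List[GridPos] = []
--     if row1 == row2:
--         step = 1 if col2 > col1 else -1
--         for col in range(col1 + step, col2, step):
--             cells.append((row1, col))
--     elif col1 == col2:
--         step = 1 if row2 > row1 else -1
--         for row in range(row1 + step, row2, step):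
--             cells.append((row, col1))
--     return cells
--
-- def _polyline_cells(points: List[GridPos]) -> List[GridPos]:
--     cells: List[GridPos] = []
--     for idx in range(len(points) - 1):
--         segment = _line_cells(points[idx], points[idx + 1])
--         cells.extend(segment)
--         if idx < len(points) - 2:
--             cells.append(points[idx + 1])
--     return cells
-- ===== SOURCE B (Python) =====
-- def _step(cur, tgt):
--     # one unit step from cur toward tgt (componentwise sign)
--     dr = (tgt[0] > cur[0]) - (tgt[0] < cur[0])
--     dc = (tgt[1] > cur[1]) - (tgt[1] < cur[1])
--     return (cur[0] + dr, cur[1] + dc)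
--
-- def _walk(cur, tgt):
--     # cells strictly between cur and tgt, emitted by a unit cursor walk
--     # (empty for a diagonal or zero-length segment)
--     cells = []
--     if cur[0] != tgt[0] and cur[1] != tgt[1]:
--         return cells
--     pos = _step(cur, tgt)
--     while pos != tgt:
--         cells.append(pos)
--         pos = _step(pos, tgt)
--     return cells
--
-- def _polyline_cells(points):
--     if not points:
--         return []
--     cur, rest, out = points[0], points[1:], []
--     while rest:
--         tgt, rest = rest[0], rest[1:]
--         seg = _walk(cur, tgt)
--         out += seg if not rest else seg + [tgt]
--         cur = tgt
--     return out
-- ===== Notes on version B (the rewrite author's own statement) =====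
-- stated objective: alternative
-- what changed: A enumerates segment indices with range() and generates each segment's interior cells by arithmetic range(); B recurses structurally over the point list and emits each segment's interior cells one at a time with a unit cursor walk driven by a componentwise sign-step function, with no range() or index arithmetic.
import Mathlib
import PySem

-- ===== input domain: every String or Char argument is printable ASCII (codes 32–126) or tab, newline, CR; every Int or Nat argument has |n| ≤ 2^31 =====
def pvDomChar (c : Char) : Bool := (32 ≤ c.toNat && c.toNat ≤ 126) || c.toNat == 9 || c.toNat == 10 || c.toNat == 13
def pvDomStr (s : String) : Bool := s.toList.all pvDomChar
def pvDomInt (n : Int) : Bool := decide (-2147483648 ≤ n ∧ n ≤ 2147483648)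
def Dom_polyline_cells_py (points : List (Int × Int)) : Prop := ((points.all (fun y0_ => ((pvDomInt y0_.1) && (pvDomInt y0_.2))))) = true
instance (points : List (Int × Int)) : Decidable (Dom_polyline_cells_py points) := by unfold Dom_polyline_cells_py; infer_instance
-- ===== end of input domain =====

-- B replaces A's index loop over range() + per-segment range-generated cells with a
-- recursive unit-step cursor walk (componentwise sign step) over the tail of the
-- point list. Same asymptotic cost (objective: alternative).

-- ===== PORT A =====
def line_cells (start_ end_ : Int × Int) : List (Int × Int) :=
  let row1 := start_.1
  let col1 := start_.2
  let row2 := end_.1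
  let col2 := end_.2
  if row1 = row2 then
    let step : Int := if col2 > col1 then 1 else -1
    (PySem.List.pyRange (col1 + step) col2 step).foldl
      (fun cells col => cells ++ [(row1, col)]) []
  else if col1 = col2 then
    let step : Int := if row2 > row1 then 1 else -1
    (PySem.List.pyRange (row1 + step) row2 step).foldl
      (fun cells row => cells ++ [(row, col1)]) []
  else []

def polyline_cells_py (points : List (Int × Int)) : List (Int × Int) :=
  (PySem.List.pyRange 0 ((points.length : Int) - 1) 1).foldl
    (fun cells idx =>
      let segment := line_cells (PySem.List.pyGetD points idx (0, 0))
                                (PySem.List.pyGetD points (idx + 1) (0, 0))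
      let cells := cells ++ segment
      if idx < (points.length : Int) - 2 then
        cells ++ [PySem.List.pyGetD points (idx + 1) (0, 0)]
      else cells) []

-- ===== PORT B =====
def bStep (cur tgt : Int × Int) : Int × Int :=
  let dr : Int := (if tgt.1 > cur.1 then 1 else 0) - (if tgt.1 < cur.1 then 1 else 0)
  let dc : Int := (if tgt.2 > cur.2 then 1 else 0) - (if tgt.2 < cur.2 then 1 else 0)
  (cur.1 + dr, cur.2 + dc)

-- Source B's _walk recursion, made structural on the exact number of remaining
-- unit steps (the L1 distance to the target), which bounds it on the
-- axis-aligned segments the walk traverses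
def bWalkAux : Nat → Int × Int → Int × Int → List (Int × Int)
  | 0, _, _ => []
  | n + 1, cur, tgt =>
    if bStep cur tgt = tgt then []
    else bStep cur tgt :: bWalkAux n (bStep cur tgt) tgt

def bWalk (cur tgt : Int × Int) : List (Int × Int) :=
  if cur.1 ≠ tgt.1 ∧ cur.2 ≠ tgt.2 then []
  else bWalkAux ((tgt.1 - cur.1).natAbs + (tgt.2 - cur.2).natAbs) cur tgt

def bGo (cur : Int × Int) : List (Int × Int) → List (Int × Int)
  | [] => []
  | tgt :: rest =>
    let seg := bWalk cur tgt
    if rest = [] then seg else seg ++ tgt :: bGo tgt rest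

def polyline_cells_py_alt (points : List (Int × Int)) : List (Int × Int) :=
  match points with
  | [] => []
  | p :: rest => bGo p rest

-- ===== PRECONDITION & SPEC =====
def Spec_polyline_cells_py (points : List (Int × Int)) (out : List (Int × Int)) : Prop := out = polyline_cells_py_alt points
instance (points : List (Int × Int)) (out : List (Int × Int)) : Decidable (Spec_polyline_cells_py points out) := by unfold Spec_polyline_cells_py; infer_instance

-- ===== CLAIM (what is proved, stated in full; the proofs are below) =====
def Claim_equal_polyline_cells_py : Prop := ∀ (points : List (Int × Int)), Dom_polyline_cells_py points → Spec_polyline_cells_py points (polyline_cells_py points)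

-- ===== LEMMAS AND PROOFS =====

-- common reference shape: segments interleaved with interior corner points
def specPath (p : Int × Int) : List (Int × Int) → List (Int × Int)
  | [] => []
  | [q] => line_cells p q
  | q :: r :: t => line_cells p q ++ q :: specPath q (r :: t)

-- A's loop body at (Nat) index k
def gA (points : List (Int × Int)) (k : Nat) : List (Int × Int) :=
  line_cells (points.getD k (0, 0)) (points.getD (k + 1) (0, 0)) ++
    (if (k : Int) < (points.length : Int) - 2 then [points.getD (k + 1) (0, 0)] else [])

-- accumulator-append fold = init ++ flatMap
theorem foldl_acc_flatMap {α β : Type} (f : β → List α) :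
    ∀ (l : List β) (init : List α),
      l.foldl (fun acc x => acc ++ f x) init = init ++ l.flatMap f := by
  intro l
  induction l with
  | nil => simp
  | cons x t ih => intro init; simp [List.foldl_cons, ih, List.append_assoc]

theorem portA_flat (points : List (Int × Int)) :
    polyline_cells_py points = (List.range (points.length - 1)).flatMap (gA points) := by
  unfold polyline_cells_py
  rw [PySem.List.pyRange_one]
  have hlen : (((points.length : Int) - 1) - 0).toNat = points.length - 1 := by omega
  rw [hlen, List.foldl_map]
  have hbody : (fun (cells : List (Int × Int)) (k : Nat) =>
      (fun (cells : List (Int × Int)) (idx : Int) =>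
        let segment := line_cells (PySem.List.pyGetD points idx (0, 0))
                                  (PySem.List.pyGetD points (idx + 1) (0, 0))
        let cells := cells ++ segment
        if idx < (points.length : Int) - 2 then
          cells ++ [PySem.List.pyGetD points (idx + 1) (0, 0)]
        else cells) cells (0 + (k : Int))) =
      (fun (cells : List (Int × Int)) (k : Nat) => cells ++ gA points k) := by
    funext cells k
    have hk1 : (0 + (k : Int)) = ((k : Nat) : Int) := by omega
    have hk2 : ((k : Int) + 1) = ((k + 1 : Nat) : Int) := by omega
    simp only [hk1, hk2, PySem.List.pyGetD_natCast, gA]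
    split_ifs with h1 <;> simp [List.append_assoc]
  rw [hbody, foldl_acc_flatMap]
  simp

theorem flat_eq_spec : ∀ (rest : List (Int × Int)) (p : Int × Int),
    (List.range ((p :: rest).length - 1)).flatMap (gA (p :: rest)) = specPath p rest := by
  intro rest
  induction rest with
  | nil => intro p; rfl
  | cons q t ih =>
    intro p
    cases t with
    | nil =>
      simp [gA, specPath, List.range_succ]
    | cons r t' =>
      have hshift : ∀ k : Nat, gA (p :: q :: r :: t') (k + 1) = gA (q :: r :: t') k := by
        intro k
        simp only [gA, List.getD_cons_succ, List.length_cons]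
        congr 1
        have hiff : ((k + 1 : Nat) : Int) < ((t'.length + 1 + 1 + 1 : Nat) : Int) - 2 ↔
            ((k : Nat) : Int) < ((t'.length + 1 + 1 : Nat) : Int) - 2 := by push_cast; omega
        split_ifs with h1 h2 h2
        · rfl
        · exact absurd (hiff.mp h1) h2
        · exact absurd (hiff.mpr h2) h1
        · rfl
      have hlen : (p :: q :: r :: t').length - 1 = ((q :: r :: t').length - 1) + 1 := by
        simp
      rw [hlen, List.range_succ_eq_map]
      simp only [List.flatMap_cons, List.flatMap_map]
      rw [show (fun k => gA (p :: q :: r :: t') (k + 1)) = gA (q :: r :: t') from funext hshift]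
      rw [ih q]
      have h0 : gA (p :: q :: r :: t') 0 = line_cells p q ++ [q] := by
        simp only [gA, List.getD_cons_zero, List.getD_cons_succ, List.length_cons]
        rw [if_pos (by push_cast; omega)]
      rw [h0]
      simp [specPath]

-- the walker along a horizontal segment, increasing columns
theorem walk_row_up : ∀ (n : Nat) (r c1 c2 : Int), c1 ≤ c2 → (c2 - c1).toNat = n →
    bWalkAux n (r, c1) (r, c2) = (PySem.List.pyRange (c1 + 1) c2 (1)).map (fun z => (r, z)) := by
  intro n
  induction n with
  | zero =>
    intro r c1 c2 hle hn
    rw [show bWalkAux 0 (r, c1) (r, c2) = [] from rfl,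
        PySem.List.pyRange_one_eq_nil (by omega)]
    simp
  | succ m ih =>
    intro r c1 c2 hle hn
    have hstep : bStep (r, c1) (r, c2) = (r, c1 + 1) := by
      simp [bStep]; omega
    rw [bWalkAux, hstep]
    by_cases hend : c1 + 1 = c2
    · rw [if_pos (by simp [hend]), PySem.List.pyRange_one_eq_nil (by omega)]
      simp
    · rw [if_neg (by simp [Prod.ext_iff]; omega)]
      rw [ih r (c1 + 1) c2 (by omega) (by omega)]
      rw [PySem.List.pyRange_one_cons (by omega : c1 + 1 < c2)]
      simp

-- the walker along a horizontal segment, decreasing columns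
theorem walk_row_down : ∀ (n : Nat) (r c1 c2 : Int), c2 ≤ c1 → (c1 - c2).toNat = n →
    bWalkAux n (r, c1) (r, c2) = (PySem.List.pyRange (c1 - 1) c2 (-1)).map (fun z => (r, z)) := by
  intro n
  induction n with
  | zero =>
    intro r c1 c2 hle hn
    rw [show bWalkAux 0 (r, c1) (r, c2) = [] from rfl,
        PySem.List.pyRange_neg_one_eq_nil (by omega)]
    simp
  | succ m ih =>
    intro r c1 c2 hle hn
    have hstep : bStep (r, c1) (r, c2) = (r, c1 - 1) := by
      simp [bStep]; omega
    rw [bWalkAux, hstep]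
    by_cases hend : c1 - 1 = c2
    · rw [if_pos (by simp [hend]), PySem.List.pyRange_neg_one_eq_nil (by omega)]
      simp
    · rw [if_neg (by simp [Prod.ext_iff]; omega)]
      rw [ih r (c1 - 1) c2 (by omega) (by omega)]
      rw [PySem.List.pyRange_neg_one_cons (by omega : c2 < c1 - 1)]
      simp

-- the walker along a vertical segment, increasing rows
theorem walk_col_up : ∀ (n : Nat) (c r1 r2 : Int), r1 ≤ r2 → (r2 - r1).toNat = n →
    bWalkAux n (r1, c) (r2, c) = (PySem.List.pyRange (r1 + 1) r2 (1)).map (fun z => (z, c)) := by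
  intro n
  induction n with
  | zero =>
    intro c r1 r2 hle hn
    rw [show bWalkAux 0 (r1, c) (r2, c) = [] from rfl,
        PySem.List.pyRange_one_eq_nil (by omega)]
    simp
  | succ m ih =>
    intro c r1 r2 hle hn
    have hstep : bStep (r1, c) (r2, c) = (r1 + 1, c) := by
      simp [bStep]; omega
    rw [bWalkAux, hstep]
    by_cases hend : r1 + 1 = r2
    · rw [if_pos (by simp [hend]), PySem.List.pyRange_one_eq_nil (by omega)]
      simp
    · rw [if_neg (by simp [Prod.ext_iff]; omega)]
      rw [ih c (r1 + 1) r2 (by omega) (by omega)]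
      rw [PySem.List.pyRange_one_cons (by omega : r1 + 1 < r2)]
      simp

-- the walker along a vertical segment, decreasing rows
theorem walk_col_down : ∀ (n : Nat) (c r1 r2 : Int), r2 ≤ r1 → (r1 - r2).toNat = n →
    bWalkAux n (r1, c) (r2, c) = (PySem.List.pyRange (r1 - 1) r2 (-1)).map (fun z => (z, c)) := by
  intro n
  induction n with
  | zero =>
    intro c r1 r2 hle hn
    rw [show bWalkAux 0 (r1, c) (r2, c) = [] from rfl,
        PySem.List.pyRange_neg_one_eq_nil (by omega)]
    simp
  | succ m ih =>
    intro c r1 r2 hle hn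
    have hstep : bStep (r1, c) (r2, c) = (r1 - 1, c) := by
      simp [bStep]; omega
    rw [bWalkAux, hstep]
    by_cases hend : r1 - 1 = r2
    · rw [if_pos (by simp [hend]), PySem.List.pyRange_neg_one_eq_nil (by omega)]
      simp
    · rw [if_neg (by simp [Prod.ext_iff]; omega)]
      rw [ih c (r1 - 1) r2 (by omega) (by omega)]
      rw [PySem.List.pyRange_neg_one_cons (by omega : r2 < r1 - 1)]
      simp

theorem walk_eq_line (p q : Int × Int) : bWalk p q = line_cells p q := by
  rcases p with ⟨r1, c1⟩; rcases q with ⟨r2, c2⟩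
  unfold line_cells
  by_cases hr : r1 = r2
  · subst hr
    have hb : bWalk (r1, c1) (r1, c2) =
        bWalkAux (((r1 : Int) - r1).natAbs + (c2 - c1).natAbs) (r1, c1) (r1, c2) := by
      unfold bWalk
      rw [if_neg (by simp)]
    rw [hb]
    simp only [reduceIte]
    rw [PySem.List.foldl_append_singleton_eq_map]
    by_cases hc : c2 > c1
    · rw [if_pos hc,
          show ((r1 : Int) - r1).natAbs + (c2 - c1).natAbs = (c2 - c1).toNat by omega]
      exact walk_row_up (c2 - c1).toNat r1 c1 c2 (le_of_lt hc) rfl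
    · rw [if_neg hc,
          show ((r1 : Int) - r1).natAbs + (c2 - c1).natAbs = (c1 - c2).toNat by omega]
      exact walk_row_down (c1 - c2).toNat r1 c1 c2 (by omega) rfl
  · rw [if_neg (by simpa using hr)]
    by_cases hc : c1 = c2
    · subst hc
      have hb : bWalk (r1, c1) (r2, c1) =
          bWalkAux ((r2 - r1).natAbs + ((c1 : Int) - c1).natAbs) (r1, c1) (r2, c1) := by
        unfold bWalk
        rw [if_neg (by simp)]
      rw [hb]
      simp only [reduceIte]
      rw [PySem.List.foldl_append_singleton_eq_map]
      by_cases hrr : r2 > r1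
      · rw [if_pos hrr,
            show (r2 - r1).natAbs + ((c1 : Int) - c1).natAbs = (r2 - r1).toNat by omega]
        exact walk_col_up (r2 - r1).toNat c1 r1 r2 (le_of_lt hrr) rfl
      · rw [if_neg hrr,
            show (r2 - r1).natAbs + ((c1 : Int) - c1).natAbs = (r1 - r2).toNat by omega]
        exact walk_col_down (r1 - r2).toNat c1 r1 r2 (by omega) rfl
    · rw [if_neg (by simpa using hc)]
      unfold bWalk
      rw [if_pos ⟨by simpa using hr, by simpa using hc⟩]

theorem go_eq_spec : ∀ (rest : List (Int × Int)) (p : Int × Int),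
    bGo p rest = specPath p rest := by
  intro rest
  induction rest with
  | nil => intro p; rfl
  | cons q t ih =>
    intro p
    cases t with
    | nil => simp [bGo, specPath, walk_eq_line]
    | cons r t' =>
      have h1 : bGo p (q :: r :: t') = bWalk p q ++ q :: bGo q (r :: t') := by
        simp [bGo]
      have h2 : specPath p (q :: r :: t') = line_cells p q ++ q :: specPath q (r :: t') := rfl
      rw [h1, h2, ih q, walk_eq_line]

-- ===== VERDICT (by name: the statement is the Claim_ definition above) =====
theorem polyline_cells_py_spec : Claim_equal_polyline_cells_py := by
  intro points _
  unfold Spec_polyline_cells_py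
  cases points with
  | nil => rfl
  | cons p rest =>
    have halt : polyline_cells_py_alt (p :: rest) = bGo p rest := rfl
    rw [portA_flat, flat_eq_spec, halt, go_eq_spec]
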